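/- GENERATED by tools/from_farm_form.py from farm/worked/sin_poly/Proof.lean (a worked proof of the farm's unit `sin_poly`,
   accepted by the verdict) — do not edit. -/
import ProgX.Base.Spec.Units.sin_poly

open X86 X86.User Asan ProgX.Base

set_option maxRecDepth 4000
set_option maxHeartbeats 4000000

/-- `sin_poly` satisfies its contract: 46 straight-line SSE instructions (nine Horner steps over constants of `.rodata`,
read by RIP-relative operands) and a `ret`; nothing is stored, so the memory, and with it the shadow, is unchanged. -/
theorem ProgX.Base.Spec.Proved.sin_poly_ok : ProgX.Base.Spec.sin_poly.Statement := by
  intro Lay hLay μ hμ u₀ hcode others frames u ret he hpre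
  v_entry he
  have hsp := hpre.rsp
  -- 0x101e60 … 0x101f40 (libm.c:179–191): one walk to the `ret`; the `.rodata` loads are placed by `v_side`
  u_walk hcode [hμ.vendor] span [ProgX.Base.L.textLo, ProgX.Base.L.textHi] side (v_side)
  -- 0x101f40 (libm.c:191): the state after the `ret`: the contract's `Returned`
  refine ReachVia.done ?_
  v_returned
  -- the post: no byte of the shadow was written (no store at all: `w_mem : s_101f40.mem = u.mem`)
  show ShadowUntouched u.mem s_101f40.mem
  v_untouched
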